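-- pv_equiv track=rewrite | github.com/dong9409/DongGyu1 | CLI과제/a2_jkim543.py | parse_for_host
-- ===== SOURCE A (Python) =====
-- def parse_for_host(file_line_list):  # definition specified
--     "call this function when 'a2_<st_id>.py -l host'"
--     # TODO: complete the function
--     return_list = []
--     return_set = set()  # quick and dirty way of ignoring repeats
--     for line in file_line_list:
--         if line == '':  # if the line is empty, ignore it
--             pass
--         else:
--             splitted = line.split()  # split the line by whitespace
--             return_set.add(splitted[2])  # first item in the splitted is user
--     return_list = list(return_set)  # convert this to a list, and
--     return_list.sort()  # sort alphabetically
--     return return_list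
-- ===== SOURCE B (Python) =====
-- def parse_for_host(file_line_list):
--     "call this function when 'a2_<st_id>.py -l host'"
--     # Alternative strategy: collect all third tokens, sort them, then drop
--     # adjacent duplicates in one pass (instead of a set + final sort).
--     tokens = []
--     for line in file_line_list:
--         if line != '':
--             tokens.append(line.split()[2])
--     tokens.sort()
--     result = []
--     for t in tokens:
--         if not result or result[-1] != t:
--             result.append(t)
--     return result
-- ===== Notes on version B (the rewrite author's own statement) =====
-- stated objective: alternative
-- what changed: Replaces the set-based deduplication with collecting all third tokens, sorting the full multiset, and removing adjacent duplicates in a single linear scan.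
import Mathlib
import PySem

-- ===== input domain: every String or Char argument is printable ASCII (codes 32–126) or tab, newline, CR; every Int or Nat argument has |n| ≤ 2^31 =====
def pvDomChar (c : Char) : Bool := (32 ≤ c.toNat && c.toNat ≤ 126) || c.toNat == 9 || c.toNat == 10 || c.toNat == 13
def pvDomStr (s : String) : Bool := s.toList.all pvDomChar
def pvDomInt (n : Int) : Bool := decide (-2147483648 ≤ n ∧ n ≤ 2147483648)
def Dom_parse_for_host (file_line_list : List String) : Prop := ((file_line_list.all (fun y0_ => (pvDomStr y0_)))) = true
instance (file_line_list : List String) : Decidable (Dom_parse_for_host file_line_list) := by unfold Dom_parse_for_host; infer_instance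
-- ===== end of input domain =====

-- B collects all third tokens, sorts the full list, and removes adjacent duplicates
-- in one pass, instead of A's set-based dedup followed by a sort.

-- ===== PORT A =====
-- splitted[2] of line.split(); total form pyGetD, exact under Pre_ (index in range)
def pvThirdTok (line : String) : String :=
  PySem.List.pyGetD (PySem.Str.split₀ line) 2 ""

def parse_for_host (file_line_list : List String) : List String :=
  let return_set : PySem.Set String :=
    file_line_list.foldl
      (fun s line => if line = "" then s else PySem.Set.add s (pvThirdTok line))
      PySem.Set.empty
  -- list(return_set); return_list.sort(): order-insensitive consumption of the set
  PySem.List.sorted return_set (fun x => x) false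

-- ===== PORT B =====
def pvUniqStep (res : List String) (t : String) : List String :=
  if res.getLast? = some t then res else res ++ [t]

def parse_for_host_alt (file_line_list : List String) : List String :=
  let tokens : List String :=
    file_line_list.foldl
      (fun ts line => if line ≠ "" then ts ++ [pvThirdTok line] else ts) []
  let sortedTokens := PySem.List.sorted tokens (fun x => x) false
  sortedTokens.foldl pvUniqStep []

-- ===== PRECONDITION & SPEC =====
-- Pre_ excludes exactly the inputs where A raises IndexError: a non-empty line
-- whose whitespace split has fewer than three tokens.
def Pre_parse_for_host (file_line_list : List String) : Prop :=
  ∀ line ∈ file_line_list, line ≠ "" → 3 ≤ (PySem.Str.split₀ line).length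
instance (file_line_list : List String) : Decidable (Pre_parse_for_host file_line_list) := by
  unfold Pre_parse_for_host; infer_instance

def pvWitness_parse_for_host : List String :=
  ["alice box host1 x", "", "bob car host2", "alice box host1 x"]

def Spec_parse_for_host (file_line_list : List String) (out : List String) : Prop :=
  out = parse_for_host_alt file_line_list
instance (file_line_list : List String) (out : List String) : Decidable (Spec_parse_for_host file_line_list out) := by
  unfold Spec_parse_for_host; infer_instance

-- ===== CLAIM (what is proved, stated in full; the proofs are below) =====
def Claim_equal_parse_for_host : Prop := ∀ (file_line_list : List String), Dom_parse_for_host file_line_list → Pre_parse_for_host file_line_list → Spec_parse_for_host file_line_list (parse_for_host file_line_list)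

-- ===== LEMMAS AND PROOFS =====

-- A's set-building fold is Set.ofList of B's token list.
theorem fold_set_eq_ofList (l : List String) (ts : List String) :
    l.foldl (fun s line => if line = "" then s else PySem.Set.add s (pvThirdTok line))
        (PySem.Set.ofList ts)
      = PySem.Set.ofList
          (l.foldl (fun acc line => if line ≠ "" then acc ++ [pvThirdTok line] else acc) ts) := by
  induction l generalizing ts with
  | nil => rfl
  | cons line rest ih =>
    rw [List.foldl_cons, List.foldl_cons]
    by_cases h : line = ""
    · rw [if_pos h, if_neg (by simp [h])]
      exact ih ts
    · have hadd : PySem.Set.add (PySem.Set.ofList ts) (pvThirdTok line)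
          = PySem.Set.ofList (ts ++ [pvThirdTok line]) := by
        simp [PySem.Set.ofList_eq_foldl, List.foldl_append]
      rw [if_neg h, if_pos h, hadd]
      exact ih (ts ++ [pvThirdTok line])

-- In a strictly increasing list every element is ≤ the last one.
theorem pairwise_le_getLast {l : List String} {x y : String}
    (hp : l.Pairwise (· < ·)) (hx : x ∈ l) (hy : l.getLast? = some y) : x ≤ y := by
  induction l with
  | nil => cases hx
  | cons a l' ih =>
    rcases List.pairwise_cons.mp hp with ⟨ha, hp'⟩
    cases l' with
    | nil =>
      simp at hy hx; simp [hx, hy]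
    | cons b l'' =>
      rw [List.getLast?_cons_cons] at hy
      rcases List.mem_cons.mp hx with rfl | hx'
      · exact le_of_lt (ha y (List.mem_of_getLast? hy))
      · exact ih hp' hx' hy

-- Invariant of B's adjacent-dedup fold over a ≤-sorted list.
theorem uniq_fold_invariant (ts : List String) :
    ∀ res : List String, res.Pairwise (· < ·) → ts.Pairwise (· ≤ ·) →
      (∀ x ∈ res, ∀ t ∈ ts, x ≤ t) →
      (ts.foldl pvUniqStep res).Pairwise (· < ·) ∧
        (∀ a, a ∈ ts.foldl pvUniqStep res ↔ a ∈ res ∨ a ∈ ts) := by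
  induction ts with
  | nil => intro res hres _ _; exact ⟨hres, fun a => by simp⟩
  | cons t ts' ih =>
    intro res hres hts hcross
    rcases List.pairwise_cons.mp hts with ⟨htle, hts'⟩
    simp only [List.foldl_cons]
    by_cases h : res.getLast? = some t
    · have htmem : t ∈ res := List.mem_of_getLast? h
      have step : pvUniqStep res t = res := by simp [pvUniqStep, h]
      rw [step]
      obtain ⟨h1, h2⟩ := ih res hres hts'
        (fun x hx u hu => hcross x hx u (List.mem_cons_of_mem _ hu))
      refine ⟨h1, fun a => ?_⟩
      rw [h2 a]
      constructor
      · rintro (ha | ha)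
        · exact Or.inl ha
        · exact Or.inr (List.mem_cons_of_mem _ ha)
      · rintro (ha | ha)
        · exact Or.inl ha
        · rcases List.mem_cons.mp ha with rfl | ha'
          · exact Or.inl htmem
          · exact Or.inr ha'
    · have step : pvUniqStep res t = res ++ [t] := by simp [pvUniqStep, h]
      rw [step]
      have hlt : ∀ x ∈ res, x < t := by
        intro x hx
        rcases lt_or_eq_of_le (hcross x hx t (by simp)) with hxt | rfl
        · exact hxt
        · exfalso
          have hne : res ≠ [] := by intro hnil; simp [hnil] at hx
          obtain ⟨y, hy⟩ := List.getLast?_isSome.mpr hne |> Option.isSome_iff_exists.mp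
          have h1 : x ≤ y := pairwise_le_getLast hres hx hy
          have h2 : y ≤ x := hcross y (List.mem_of_getLast? hy) x (by simp)
          have : y = x := le_antisymm h2 h1
          exact h (this ▸ hy)
      have hres' : (res ++ [t]).Pairwise (· < ·) := by
        rw [List.pairwise_append]
        exact ⟨hres, List.pairwise_singleton _ _, fun x hx u hu => by
          rcases List.mem_singleton.mp hu with rfl; exact hlt x hx⟩
      have hcross' : ∀ x ∈ res ++ [t], ∀ u ∈ ts', x ≤ u := by
        intro x hx u hu
        rcases List.mem_append.mp hx with hx' | hx'
        · exact hcross x hx' u (List.mem_cons_of_mem _ hu)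
        · rcases List.mem_singleton.mp hx' with rfl; exact htle u hu
      obtain ⟨h1, h2⟩ := ih (res ++ [t]) hres' hts' hcross'
      refine ⟨h1, fun a => ?_⟩
      rw [h2 a]
      simp only [List.mem_append, List.mem_cons]
      tauto

-- ===== VERDICT (by name: the statement is the Claim_ definition above) =====
theorem parse_for_host_spec : Claim_equal_parse_for_host := by
  intro l _ _
  unfold Spec_parse_for_host parse_for_host parse_for_host_alt
  set tokens : List String :=
    l.foldl (fun acc line => if line ≠ "" then acc ++ [pvThirdTok line] else acc) [] with htok
  have hset : l.foldl (fun s line => if line = "" then s else PySem.Set.add s (pvThirdTok line))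
      PySem.Set.empty = PySem.Set.ofList tokens :=
    fold_set_eq_ofList l []
  simp only [hset]
  set st := PySem.List.sorted tokens (fun x => x) false with hst
  have hsorted : st.Pairwise (· ≤ ·) := PySem.List.sorted_pairwise tokens (fun x => x)
  obtain ⟨hlt, hmem⟩ := uniq_fold_invariant st [] (List.Pairwise.nil) hsorted (by simp)
  set ys := st.foldl pvUniqStep [] with hys
  have hysnodup : ys.Nodup := hlt.imp ne_of_lt
  have hmem' : ∀ a, a ∈ ys ↔ a ∈ PySem.Set.ofList tokens := by
    intro a
    rw [hmem a, PySem.Set.mem_ofList]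
    simp only [List.not_mem_nil, false_or]
    rw [hst, PySem.List.mem_sorted]
  have hperm : ys.Perm (PySem.Set.ofList tokens) :=
    (List.perm_ext_iff_of_nodup hysnodup (PySem.Set.nodup_ofList tokens)).mpr hmem'
  exact PySem.List.sorted_eq_of_perm_of_pairwise_lt (PySem.Set.ofList tokens) ys (fun x => x) hperm hlt
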